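-- pv_equiv track=rewrite | github.com/tkosht/cursor_dev | app/ams/src/utils/json_parser.py | _extract_plain_json
-- ===== SOURCE A (Python) =====
-- def _extract_plain_json(response: str) -> str | None:
--     """Extract plain JSON from response"""
--     # Remove common prefixes/suffixes
--     lines = response.strip().split("\n")
--
--     # Find lines that look like JSON start/end
--     json_lines = []
--     in_json = False
--
--     for line in lines:
--         stripped = line.strip()
--         if stripped.startswith("{") or stripped.startswith("["):
--             in_json = True
--
--         if in_json:
--             json_lines.append(line)
--
--         if stripped.endswith("}") or stripped.endswith("]"):
--             if in_json:
--                 break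
--
--     return "\n".join(json_lines) if json_lines else None
-- ===== SOURCE B (Python) =====
-- def _extract_plain_json(response: str) -> str | None:
--     """Extract plain JSON from response.
--
--     Recursive decomposition over str.partition("\n"): peel one line at a time,
--     descend until a line opens a JSON block, then _take collects lines by string
--     concatenation up to the first closing line (or end of text). No line list,
--     no boolean flag, no join.
--     """
--     return _scan(response.strip())
--
--
-- def _scan(s: str) -> str | None:
--     line, sep, rest = s.partition("\n")
--     t = line.strip()
--     if t.startswith("{") or t.startswith("["):
--         return _take(s)
--     return _scan(rest) if sep else None
--
--
-- def _take(s: str) -> str: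
--     line, sep, rest = s.partition("\n")
--     t = line.strip()
--     if t.endswith("}") or t.endswith("]") or not sep:
--         return line
--     return line + "\n" + _take(rest)
-- ===== Notes on version B (the rewrite author's own statement) =====
-- stated objective: alternative
-- what changed: Replaces A's split-into-line-list + single loop with an in_json boolean flag + join by a recursive decomposition over str.partition on the newline character: _scan peels one line at a time looking for an opening line, then _take builds the block by direct string concatenation up to the first closing line; no line list, no flag and no join are ever built.
import Mathlib
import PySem

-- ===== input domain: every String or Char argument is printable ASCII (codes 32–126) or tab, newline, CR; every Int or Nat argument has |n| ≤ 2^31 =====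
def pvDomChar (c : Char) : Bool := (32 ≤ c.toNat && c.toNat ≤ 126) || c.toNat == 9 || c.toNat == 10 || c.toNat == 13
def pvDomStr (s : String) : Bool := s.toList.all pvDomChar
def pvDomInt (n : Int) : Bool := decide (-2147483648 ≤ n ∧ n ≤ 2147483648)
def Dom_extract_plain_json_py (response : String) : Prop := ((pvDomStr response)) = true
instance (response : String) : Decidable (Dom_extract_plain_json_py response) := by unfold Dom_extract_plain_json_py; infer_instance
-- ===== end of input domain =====

-- B replaces A's line-list + in_json flag loop + join by a recursive decomposition over
-- partition("\n"), building the block by string concatenation (objective: alternative).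


-- ===== PORT A =====
-- A's loop: json_lines accumulator, in_json flag, break on a closing line while in_json.
def pvLoopA : List String → List String → Bool → List String
  | [], acc, _ => acc
  | l :: rest, acc, inj =>
      let s := PySem.Str.strip l
      let inj' := if PySem.Str.startswith s "{" || PySem.Str.startswith s "[" then true else inj
      let acc' := if inj' then acc ++ [l] else acc
      if (PySem.Str.endswith s "}" || PySem.Str.endswith s "]") && inj' then acc'
      else pvLoopA rest acc' inj'

def extract_plain_json_py (response : String) : Option String :=
  let lines := (PySem.Str.split? (PySem.Str.strip response) "\n").getD []
  let json_lines := pvLoopA lines [] false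
  if json_lines.isEmpty then none else some (PySem.Str.join "\n" json_lines)

-- ===== PORT B =====
-- B's str.partition("\n") on a char list: (line before the first '\n', was a '\n' found, rest after it).
def pvSplitLine : List Char → List Char × Bool × List Char
  | [] => ([], false, [])
  | c :: cs =>
      if c = '\n' then ([], true, cs)
      else let (l, s, r) := pvSplitLine cs; (c :: l, s, r)

-- termination of the recursions below: the rest after a found '\n' is strictly shorter.
theorem pvSplitLine_lt (cs : List Char) (l : List Char) (r : List Char)
    (h : pvSplitLine cs = (l, true, r)) : r.length < cs.length := by
  induction cs generalizing l r with
  | nil => simp [pvSplitLine] at h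
  | cons c rest ih =>
      by_cases hc : c = '\n'
      · rw [show pvSplitLine (c :: rest) = ([], true, rest) by simp [pvSplitLine, hc]] at h
        simp only [Prod.mk.injEq] at h
        rw [← h.2.2]
        simp only [List.length_cons]; omega
      · simp only [pvSplitLine, if_neg hc] at h
        rcases he : pvSplitLine rest with ⟨l', s', r'⟩
        rw [he] at h
        simp only [Prod.mk.injEq] at h
        obtain ⟨_, hs, hr⟩ := h
        subst hr
        have := ih l' r' (by rw [he, hs])
        simp only [List.length_cons]; omega

theorem pvSplitLine_lt' (cs : List Char) (h : (pvSplitLine cs).2.1 = true) :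
    (pvSplitLine cs).2.2.length < cs.length :=
  pvSplitLine_lt cs (pvSplitLine cs).1 (pvSplitLine cs).2.2 (by rw [← h])

-- B's _take: the current line, then — unless it closes the block or the text ends — "\n" and the rest.
def pvTakeB (cs : List Char) : List Char :=
  let p := pvSplitLine cs
  if PySem.Chars.endswith (PySem.Chars.strip p.1) ['}'] || PySem.Chars.endswith (PySem.Chars.strip p.1) [']'] || !p.2.1 then p.1
  else p.1 ++ '\n' :: pvTakeB p.2.2
termination_by cs.length
decreasing_by
  rename_i h
  refine pvSplitLine_lt' cs ?_
  by_contra hb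
  rw [Bool.not_eq_true] at hb
  exact h (by rw [hb]; simp)

-- B's _scan: descend line by line until one opens a JSON block, then delegate to _take.
def pvScanB (cs : List Char) : Option (List Char) :=
  let p := pvSplitLine cs
  if PySem.Chars.startswith (PySem.Chars.strip p.1) ['{'] || PySem.Chars.startswith (PySem.Chars.strip p.1) ['['] then
    some (pvTakeB cs)
  else if p.2.1 then pvScanB p.2.2 else none
termination_by cs.length
decreasing_by
  rename_i h1 h2
  exact pvSplitLine_lt' cs h2

def extract_plain_json_py_alt (response : String) : Option String :=
  (pvScanB (PySem.Str.strip response).toList).map String.ofList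

-- ===== PRECONDITION & SPEC =====
def Spec_extract_plain_json_py (response : String) (out : Option String) : Prop := out = extract_plain_json_py_alt response
instance (response : String) (out : Option String) : Decidable (Spec_extract_plain_json_py response out) := by unfold Spec_extract_plain_json_py; infer_instance

-- ===== CLAIM (what is proved, stated in full; the proofs are below) =====
def Claim_equal_extract_plain_json_py : Prop := ∀ (response : String), Dom_extract_plain_json_py response → Spec_extract_plain_json_py response (extract_plain_json_py response)

-- ===== LEMMAS AND PROOFS =====

-- the line structure of a char list, as split?/splitOn computes it (proof helper only).
def pvLinesC (cs : List Char) : List (List Char) :=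
  let p := pvSplitLine cs
  if p.2.1 then p.1 :: pvLinesC p.2.2 else [p.1]
termination_by cs.length
decreasing_by
  rename_i h
  exact pvSplitLine_lt' cs h

theorem pvLinesC_ne_nil (cs : List Char) : pvLinesC cs ≠ [] := by
  rw [pvLinesC]
  rcases h : pvSplitLine cs with ⟨l, sep, r⟩
  cases sep <;> simp

-- splitOn.go on separator "\n" computes pvLinesC (with cur prepended to the first line).
theorem pv_go_nl (fuel : Nat) (l cur : List Char) (acc : List (List Char)) (hf : l.length ≤ fuel) :
    PySem.Chars.splitOn.go ['\n'] fuel l cur acc =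
      acc.reverse ++ (match pvLinesC l with
                      | [] => []
                      | x :: xs => (cur.reverse ++ x) :: xs) := by
  induction fuel generalizing l cur acc with
  | zero =>
      have : l = [] := by cases l <;> simp_all
      subst this
      simp [PySem.Chars.splitOn.go, pvLinesC, pvSplitLine]
  | succ fuel ih =>
      cases l with
      | nil => simp [PySem.Chars.splitOn.go, pvLinesC, pvSplitLine]
      | cons c rest =>
          by_cases hc : c = '\n'
          · subst hc
            rw [show pvLinesC ('\n' :: rest) = [] :: pvLinesC rest by rw [pvLinesC]; simp [pvSplitLine]]
            rw [show PySem.Chars.splitOn.go ['\n'] (fuel+1) ('\n' :: rest) cur acc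
                  = PySem.Chars.splitOn.go ['\n'] fuel rest [] (cur.reverse :: acc) by
                  simp [PySem.Chars.splitOn.go, List.isPrefixOf]]
            rw [ih rest [] (cur.reverse :: acc) (by simp at hf; omega)]
            cases h0 : pvLinesC rest with
            | nil => simp
            | cons x xs => simp
          · rw [show PySem.Chars.splitOn.go ['\n'] (fuel+1) (c :: rest) cur acc
                  = PySem.Chars.splitOn.go ['\n'] fuel rest (c :: cur) acc by
                  simp [PySem.Chars.splitOn.go, List.isPrefixOf, Ne.symm hc]]
            rw [ih rest (c :: cur) acc (by simp at hf; omega)]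
            rcases he : pvSplitLine rest with ⟨l', s', r'⟩
            rw [show pvLinesC (c :: rest) = if s' then (c :: l') :: pvLinesC r' else [c :: l'] by
                  rw [pvLinesC]; simp [pvSplitLine, hc, he]]
            rw [show pvLinesC rest = if s' then l' :: pvLinesC r' else [l'] by rw [pvLinesC, he]]
            cases s' <;> simp

theorem pv_splitOn_eq_linesC (cs : List Char) :
    PySem.Chars.splitOn cs ['\n'] = pvLinesC cs := by
  rw [PySem.Chars.splitOn, pv_go_nl (cs.length + 1) cs [] [] (by omega)]
  cases h : pvLinesC cs with
  | nil => exact absurd h (pvLinesC_ne_nil cs)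
  | cons x xs => simp

-- index of the first opening line (characterises where A's in_json flag first becomes true).
def pvFindStartIdx : List String → Nat → Option Nat
  | [], _ => none
  | l :: rest, i =>
      if PySem.Str.startswith (PySem.Str.strip l) "{" || PySem.Str.startswith (PySem.Str.strip l) "[" then some i
      else pvFindStartIdx rest (i + 1)

-- the lines A collects once in_json is true: up to and including the first closing line.
def pvTakeBlock : List String → List String
  | [] => []
  | l :: rest =>
      l :: (if PySem.Str.endswith (PySem.Str.strip l) "}" || PySem.Str.endswith (PySem.Str.strip l) "]" then []
            else pvTakeBlock rest)

theorem pv_strjoin_cons_cons (x : List Char) (y : String) (ys : List String) :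
    PySem.Str.join "\n" (String.ofList x :: y :: ys) = String.ofList (x ++ '\n' :: (PySem.Str.join "\n" (y :: ys)).toList) := by
  simp only [PySem.Str.join, String.toList_ofList, List.map_cons]
  rw [show ("\n" : String).toList = ['\n'] from rfl, PySem.Chars.join_cons_cons]
  simp

-- joining the taken block of the line list IS B's _take on the raw characters.
theorem pv_take_join (cs : List Char) :
    PySem.Str.join "\n" (pvTakeBlock ((pvLinesC cs).map String.ofList)) = String.ofList (pvTakeB cs) := by
  induction cs using pvTakeB.induct with
  | case1 cs p hcond =>
      have hpd : p = pvSplitLine cs := rfl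
      clear_value p
      subst hpd
      rcases hp : pvSplitLine cs with ⟨l, sep, r⟩
      rw [hp] at hcond
      have e1 : pvTakeB cs = l := by rw [pvTakeB]; simp only [hp]; rw [if_pos hcond]
      rw [e1]
      cases sep with
      | false =>
          have e2 : pvLinesC cs = [l] := by rw [pvLinesC]; simp [hp]
          rw [e2]
          simp only [List.map_cons, List.map_nil]
          rw [show pvTakeBlock [String.ofList l] = [String.ofList l] by simp [pvTakeBlock]]
          simp only [PySem.Str.join, List.map_cons, List.map_nil, String.toList_ofList,
            PySem.Chars.join_singleton]
      | true =>
          simp only [Bool.not_true, Bool.or_false] at hcond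
          have e2 : pvLinesC cs = l :: pvLinesC r := by rw [pvLinesC]; simp [hp]
          rw [e2]
          simp only [List.map_cons]
          rw [show pvTakeBlock (String.ofList l :: (pvLinesC r).map String.ofList) = [String.ofList l] by
                simp [pvTakeBlock, hcond]]
          simp only [PySem.Str.join, List.map_cons, List.map_nil, String.toList_ofList,
            PySem.Chars.join_singleton]
  | case2 cs p hcond ih =>
      have hpd : p = pvSplitLine cs := rfl
      clear_value p
      subst hpd
      rcases hp : pvSplitLine cs with ⟨l, sep, r⟩
      rw [hp] at hcond ih
      replace ih : PySem.Str.join "\n" (pvTakeBlock ((pvLinesC r).map String.ofList)) = String.ofList (pvTakeB r) := ih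
      simp only [Bool.or_eq_true, not_or, Bool.not_eq_true, Bool.not_eq_eq_eq_not, Bool.not_true,
        Bool.not_eq_false] at hcond
      obtain ⟨⟨h1, h2⟩, h3⟩ := hcond
      subst h3
      have e1 : pvTakeB cs = l ++ '\n' :: pvTakeB r := by
        rw [pvTakeB]; simp only [hp]; rw [if_neg (by simp [h1, h2])]
      have e2 : pvLinesC cs = l :: pvLinesC r := by rw [pvLinesC]; simp [hp]
      rw [e1, e2]
      simp only [List.map_cons]
      rw [show pvTakeBlock (String.ofList l :: (pvLinesC r).map String.ofList)
            = String.ofList l :: pvTakeBlock ((pvLinesC r).map String.ofList) by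
            simp [pvTakeBlock, h1, h2]]
      rcases h0 : (pvLinesC r).map String.ofList with _ | ⟨x, xs⟩
      · exact absurd (List.map_eq_nil_iff.mp h0) (pvLinesC_ne_nil r)
      · rcases h1' : pvTakeBlock (x :: xs) with _ | ⟨y, ys⟩
        · simp [pvTakeBlock] at h1'
        · rw [h0, h1'] at ih
          rw [pv_strjoin_cons_cons, ih, String.toList_ofList]

theorem pvFindStartIdx_shift (xs : List String) (k : Nat) :
    pvFindStartIdx xs (k + 1) = (pvFindStartIdx xs k).map (· + 1) := by
  induction xs generalizing k with
  | nil => simp [pvFindStartIdx]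
  | cons l rest ih =>
      by_cases hs : (PySem.Chars.startswith (PySem.Chars.strip l.toList) ['{'] = true ∨
                     PySem.Chars.startswith (PySem.Chars.strip l.toList) ['['] = true)
      · simp [pvFindStartIdx, hs]
      · simp [pvFindStartIdx, hs, ih]

-- A's find-start/take-block form IS B's _scan, on the raw characters.
theorem pv_scan_eq (cs : List Char) :
    (match pvFindStartIdx ((pvLinesC cs).map String.ofList) 0 with
     | none => none
     | some i => some (PySem.Str.join "\n" (pvTakeBlock (((pvLinesC cs).map String.ofList).drop i)))) =
      (pvScanB cs).map String.ofList := by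
  induction cs using pvScanB.induct with
  | case1 cs p hstart =>
      have hpd : p = pvSplitLine cs := rfl
      clear_value p
      subst hpd
      rcases hp : pvSplitLine cs with ⟨l, sep, r⟩
      rw [hp] at hstart
      have eS : pvScanB cs = some (pvTakeB cs) := by
        rw [pvScanB]; simp only [hp]; rw [if_pos hstart]
      obtain ⟨tail, e2⟩ : ∃ tail, pvLinesC cs = l :: tail := by
        rw [pvLinesC]; simp only [hp]
        cases sep <;> exact ⟨_, rfl⟩
      rw [eS, e2]
      rw [show pvFindStartIdx ((l :: tail).map String.ofList) 0 = some 0 by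
            simp [pvFindStartIdx, hstart]]
      simp only [List.drop_zero, Option.map_some]
      rw [← e2, pv_take_join]
  | case2 cs p hstart hsep ih =>
      have hpd : p = pvSplitLine cs := rfl
      clear_value p
      subst hpd
      rcases hp : pvSplitLine cs with ⟨l, sep, r⟩
      rw [hp] at hstart hsep ih
      subst hsep
      replace ih : (match pvFindStartIdx ((pvLinesC r).map String.ofList) 0 with
                    | none => none
                    | some i => some (PySem.Str.join "\n" (pvTakeBlock (((pvLinesC r).map String.ofList).drop i)))) =
          (pvScanB r).map String.ofList := ih
      have eS : pvScanB cs = pvScanB r := by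
        rw [pvScanB]; simp only [hp]; rw [if_neg hstart]; rfl
      have e2 : pvLinesC cs = l :: pvLinesC r := by rw [pvLinesC]; simp [hp]
      rw [eS, e2, List.map_cons]
      rw [show pvFindStartIdx (String.ofList l :: (pvLinesC r).map String.ofList) 0
            = pvFindStartIdx ((pvLinesC r).map String.ofList) 1 by
            simp only [pvFindStartIdx]
            rw [if_neg (by simpa using hstart)]]
      rw [show (1 : Nat) = 0 + 1 from rfl, pvFindStartIdx_shift]
      cases h0 : pvFindStartIdx ((pvLinesC r).map String.ofList) 0 with
      | none => rw [h0] at ih; simpa using ih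
      | some i =>
          rw [h0] at ih
          simp only [Option.map_some, List.drop_succ_cons]
          simpa using ih
  | case3 cs p hstart hsep =>
      have hpd : p = pvSplitLine cs := rfl
      clear_value p
      subst hpd
      rcases hp : pvSplitLine cs with ⟨l, sep, r⟩
      rw [hp] at hstart hsep
      have hsf : sep = false := by revert hsep; cases sep <;> simp
      subst hsf
      have eS : pvScanB cs = none := by
        rw [pvScanB]; simp only [hp]; rw [if_neg hstart]; rfl
      have e2 : pvLinesC cs = [l] := by rw [pvLinesC]; simp [hp]
      rw [eS, e2]
      rw [show pvFindStartIdx ([l].map String.ofList) 0 = none by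
            simp only [List.map_cons, List.map_nil, pvFindStartIdx]
            rw [if_neg (by simpa using hstart)]]
      rfl

theorem pvLoopA_true (xs : List String) (acc : List String) :
    pvLoopA xs acc true = acc ++ pvTakeBlock xs := by
  induction xs generalizing acc with
  | nil => simp [pvLoopA, pvTakeBlock]
  | cons l rest ih =>
      by_cases he : (PySem.Chars.endswith (PySem.Chars.strip l.toList) ['}'] = true ∨
                     PySem.Chars.endswith (PySem.Chars.strip l.toList) [']'] = true)
      · simp [pvLoopA, pvTakeBlock, he]
      · simp [pvLoopA, pvTakeBlock, he, ih]

theorem pvLoopA_false (xs : List String) :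
    pvLoopA xs [] false =
      (match pvFindStartIdx xs 0 with
       | none => []
       | some i => pvTakeBlock (xs.drop i)) := by
  induction xs with
  | nil => simp [pvLoopA, pvFindStartIdx]
  | cons l rest ih =>
      by_cases hs : (PySem.Chars.startswith (PySem.Chars.strip l.toList) ['{'] = true ∨
                     PySem.Chars.startswith (PySem.Chars.strip l.toList) ['['] = true)
      · by_cases he : (PySem.Chars.endswith (PySem.Chars.strip l.toList) ['}'] = true ∨
                       PySem.Chars.endswith (PySem.Chars.strip l.toList) [']'] = true)
        · simp [pvLoopA, pvFindStartIdx, pvTakeBlock, hs, he]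
        · simp [pvLoopA, pvFindStartIdx, pvTakeBlock, hs, he, pvLoopA_true]
      · rw [show pvLoopA (l :: rest) [] false = pvLoopA rest [] false by simp [pvLoopA, hs],
            show pvFindStartIdx (l :: rest) 0 = pvFindStartIdx rest 1 by simp [pvFindStartIdx, hs],
            show (1 : Nat) = 0 + 1 from rfl, pvFindStartIdx_shift rest 0, ih]
        cases h0 : pvFindStartIdx rest 0 with
        | none => simp
        | some j => simp [List.drop_succ_cons]

theorem pvFindStartIdx_lt (xs : List String) (i : Nat) (h : pvFindStartIdx xs 0 = some i) :
    i < xs.length := by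
  induction xs generalizing i with
  | nil => simp [pvFindStartIdx] at h
  | cons l rest ih =>
      by_cases hs : (PySem.Chars.startswith (PySem.Chars.strip l.toList) ['{'] = true ∨
                     PySem.Chars.startswith (PySem.Chars.strip l.toList) ['['] = true)
      · simp [pvFindStartIdx, hs] at h; simp only [List.length_cons]; omega
      · rw [show pvFindStartIdx (l :: rest) 0 = pvFindStartIdx rest 1 by simp [pvFindStartIdx, hs],
            show (1 : Nat) = 0 + 1 from rfl, pvFindStartIdx_shift rest 0] at h
        obtain ⟨j, hj, rfl⟩ := Option.map_eq_some_iff.mp h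
        have := ih j hj
        simp; omega

-- A's loop result, packaged with the emptiness test, in find-start/take-block form.
theorem pvMain (lines : List String) :
    (if (pvLoopA lines [] false).isEmpty then none else some (PySem.Str.join "\n" (pvLoopA lines [] false))) =
      (match pvFindStartIdx lines 0 with
       | none => none
       | some start => some (PySem.Str.join "\n" (pvTakeBlock (lines.drop start)))) := by
  rw [pvLoopA_false]
  cases h : pvFindStartIdx lines 0 with
  | none => simp
  | some i =>
      have hi := pvFindStartIdx_lt _ _ h
      cases hd : lines.drop i with
      | nil =>
          have := List.drop_eq_nil_iff.mp hd
          omega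
      | cons a t => simp [hd, pvTakeBlock]

theorem pv_final (response : String) : extract_plain_json_py response = extract_plain_json_py_alt response := by
  unfold extract_plain_json_py extract_plain_json_py_alt
  have hsplit : (PySem.Str.split? (PySem.Str.strip response) "\n").getD []
      = (pvLinesC (PySem.Str.strip response).toList).map String.ofList := by
    rw [PySem.Str.split?, PySem.Chars.split?,
        show ("\n" : String).toList = ['\n'] from rfl]
    simp [pv_splitOn_eq_linesC]
  rw [hsplit]
  rw [pvMain, pv_scan_eq]

-- ===== VERDICT (by name: the statement is the Claim_ definition above) =====
theorem extract_plain_json_py_spec : Claim_equal_extract_plain_json_py := by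
  intro response _
  unfold Spec_extract_plain_json_py
  exact pv_final response
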